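-- pv_equiv track=rewrite | github.com/DavidLKing/vp-cnn | vp-cnn/conv2017.py | rebuild_dialogs
-- ===== SOURCE A (Python) =====
-- def rebuild_dialogs(corrected):
--     dialog = -1
--     turn = 0
--     num_src = []
--     for sent in [x.split('\t')[0] for x in corrected]:
--         turn += 1
--         if sent.startswith("#START"):
--             dialog += 1
--             turn = 0
--             num_src.append("FORGET")
--         else:
--             num_src.append("({}, {})".format(str(dialog), str(turn)))
--         # TODO this was from the old dict system
--         # if sent not in num_src:
--         #     num_src[sent] = []
--         # num_src[sent].append([dialog - 1, turn - 1])
--     return num_src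
-- ===== SOURCE B (Python) =====
-- def rebuild_dialogs(corrected):
--     # Pass 1: measure segment lengths between '#START' markers.
--     seg_lens = []
--     cur = 0
--     for s in [x.split('\t')[0] for x in corrected]:
--         if s.startswith("#START"):
--             seg_lens.append(cur)
--             cur = 0
--         else:
--             cur += 1
--     seg_lens.append(cur)
--     # Pass 2: emit labels per segment; leading segment has dialog -1.
--     out = ["({}, {})".format(str(-1), str(t)) for t in range(1, seg_lens[0] + 1)]
--     for d, n in enumerate(seg_lens[1:]):
--         out.append("FORGET")
--         out.extend("({}, {})".format(str(d), str(t)) for t in range(1, n + 1))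
--     return out
-- ===== Notes on version B (the rewrite author's own statement) =====
-- stated objective: alternative
-- what changed: Replaced A's single stateful loop (dialog/turn counters mutated per line) by a two-phase decomposition: one pass measures the lengths of the segments between '#START' markers, then a second phase emits the labels segment by segment (range per segment, 'FORGET' at each marker), with the leading segment labelled dialog -1.
import Mathlib
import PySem

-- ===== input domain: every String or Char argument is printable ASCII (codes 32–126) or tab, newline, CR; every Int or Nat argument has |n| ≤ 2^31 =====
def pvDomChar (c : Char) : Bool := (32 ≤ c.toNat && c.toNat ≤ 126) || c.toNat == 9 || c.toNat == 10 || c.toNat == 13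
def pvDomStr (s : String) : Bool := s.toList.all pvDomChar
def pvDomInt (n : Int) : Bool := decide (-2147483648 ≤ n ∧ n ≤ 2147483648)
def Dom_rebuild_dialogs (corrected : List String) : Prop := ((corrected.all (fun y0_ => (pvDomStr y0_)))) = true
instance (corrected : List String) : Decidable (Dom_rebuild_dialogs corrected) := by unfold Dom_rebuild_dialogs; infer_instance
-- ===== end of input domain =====

-- B replaces A's single stateful counter loop by a two-phase decomposition (segment lengths, then per-segment emission); equal cost, proved equal everywhere.

-- x.split('\t')[0] (split with a nonempty separator is never empty, so index 0 is its head)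
def pvFirstField (x : String) : String := ((PySem.Str.split? x "\t").getD []).headD ""

-- "({}, {})".format(str(d), str(t))
def pvFmt (d t : Int) : String := "(" ++ PySem.Int.toStr d ++ ", " ++ PySem.Int.toStr t ++ ")"

-- ===== PORT A =====
def rebuild_dialogs (corrected : List String) : List String :=
  ((corrected.map pvFirstField).foldl
    (fun (st : Int × Int × List String) sent =>
      let turn := st.2.1 + 1
      if PySem.Str.startswith sent "#START" then
        (st.1 + 1, 0, st.2.2 ++ ["FORGET"])
      else
        (st.1, turn, st.2.2 ++ [pvFmt st.1 turn]))
    (-1, 0, [])).2.2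

-- ===== PORT B =====
def rebuild_dialogs_alt (corrected : List String) : List String :=
  let p := (corrected.map pvFirstField).foldl
    (fun (st : List Int × Int) s =>
      if PySem.Str.startswith s "#START" then (st.1 ++ [st.2], 0) else (st.1, st.2 + 1))
    ([], 0)
  let seg_lens := p.1 ++ [p.2]
  ((PySem.List.pyRange 1 (seg_lens.headD 0 + 1) 1).map (fun t => pvFmt (-1) t)) ++
    (PySem.List.enumerate (seg_lens.drop 1) 0).flatMap
      (fun dn => "FORGET" :: (PySem.List.pyRange 1 (dn.2 + 1) 1).map (fun t => pvFmt dn.1 t))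

-- ===== PRECONDITION & SPEC =====
def Spec_rebuild_dialogs (corrected : List String) (out : List String) : Prop := out = rebuild_dialogs_alt corrected
instance (corrected : List String) (out : List String) : Decidable (Spec_rebuild_dialogs corrected out) := by unfold Spec_rebuild_dialogs; infer_instance

-- ===== CLAIM (what is proved, stated in full; the proofs are below) =====
def Claim_equal_rebuild_dialogs : Prop := ∀ (corrected : List String), Dom_rebuild_dialogs corrected → Spec_rebuild_dialogs corrected (rebuild_dialogs corrected)

-- ===== LEMMAS AND PROOFS =====

-- Common specification: labels produced from dialog d, current turn t.
def gSpec : List String → Int → Int → List String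
  | [], _, _ => []
  | s :: r, d, t =>
    if PySem.Str.startswith s "#START" then "FORGET" :: gSpec r (d + 1) 0
    else pvFmt d (t + 1) :: gSpec r d (t + 1)

theorem rebuild_fold_eq_gSpec (l : List String) (d t : Int) (acc : List String) :
    (l.foldl
      (fun (st : Int × Int × List String) sent =>
        let turn := st.2.1 + 1
        if PySem.Str.startswith sent "#START" then
          (st.1 + 1, 0, st.2.2 ++ ["FORGET"])
        else
          (st.1, turn, st.2.2 ++ [pvFmt st.1 turn]))
      (d, t, acc)).2.2 = acc ++ gSpec l d t := by
  induction l generalizing d t acc with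
  | nil => simp [gSpec]
  | cons s r ih =>
    simp at ih
    simp only [List.foldl_cons, gSpec]
    by_cases h : PySem.Chars.startswith s.toList ['#','S','T','A','R','T'] = true
    · simp [h, ih]
    · simp [h, ih]

-- Recursive form of B's segment-measuring fold.
def segRec : List String → Int → List Int × Int
  | [], c => ([], c)
  | s :: r, c =>
    if PySem.Str.startswith s "#START" then
      ((segRec r 0).1.cons c, (segRec r 0).2)
    else segRec r (c + 1)

theorem seg_fold_eq_segRec (l : List String) (S : List Int) (c : Int) :
    (l.foldl
      (fun (st : List Int × Int) s =>
        if PySem.Str.startswith s "#START" then (st.1 ++ [st.2], 0) else (st.1, st.2 + 1))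
      (S, c)) = (S ++ (segRec l c).1, (segRec l c).2) := by
  induction l generalizing S c with
  | nil => simp [segRec]
  | cons s r ih =>
    simp at ih
    simp only [List.foldl_cons, segRec]
    by_cases h : PySem.Chars.startswith s.toList ['#','S','T','A','R','T'] = true
    · simp [h, ih]
    · simp [h, ih]

def fullseg (l : List String) (c : Int) : List Int := (segRec l c).1 ++ [(segRec l c).2]

theorem fullseg_ne_nil (l : List String) (c : Int) : fullseg l c ≠ [] := by
  simp [fullseg]

theorem fullseg_cons_start (s : String) (r : List String) (c : Int)
    (h : PySem.Chars.startswith s.toList ['#','S','T','A','R','T'] = true) :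
    fullseg (s :: r) c = c :: fullseg r 0 := by
  simp [fullseg, segRec, h]

theorem fullseg_cons_nostart (s : String) (r : List String) (c : Int)
    (h : ¬ PySem.Chars.startswith s.toList ['#','S','T','A','R','T'] = true) :
    fullseg (s :: r) c = fullseg r (c + 1) := by
  simp [fullseg, segRec, h]

theorem head_fullseg_ge (l : List String) (c : Int) : c ≤ (fullseg l c).headD 0 := by
  induction l generalizing c with
  | nil => simp [fullseg, segRec]
  | cons s r ih =>
    by_cases h : PySem.Chars.startswith s.toList ['#','S','T','A','R','T'] = true
    · rw [fullseg_cons_start s r c h]; simp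
    · rw [fullseg_cons_nostart s r c h]
      exact le_trans (by omega) (ih (c + 1))

-- Labels for turns c+1 .. n of dialog d.
def fmtFrom (d c n : Int) : List String := (PySem.List.pyRange (c + 1) (n + 1) 1).map (pvFmt d)

def renderTail : List Int → Int → List String
  | [], _ => []
  | n :: rest, d => "FORGET" :: (fmtFrom d 0 n ++ renderTail rest (d + 1))

def renderFull : List Int → Int → Int → List String
  | [], _, _ => []
  | n :: rest, d, c => fmtFrom d c n ++ renderTail rest (d + 1)

theorem renderFull_fullseg_eq_gSpec (l : List String) (d c : Int) :
    renderFull (fullseg l c) d c = gSpec l d c := by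
  induction l generalizing d c with
  | nil =>
    simp [fullseg, segRec, renderFull, renderTail, gSpec, fmtFrom,
      PySem.List.pyRange_one_eq_nil (le_refl (c + 1))]
  | cons s r ih =>
    by_cases h : PySem.Chars.startswith s.toList ['#','S','T','A','R','T'] = true
    · rw [fullseg_cons_start s r c h]
      obtain ⟨n, rest, hnr⟩ := List.exists_cons_of_ne_nil (fullseg_ne_nil r 0)
      have h2 : gSpec (s :: r) d c = "FORGET" :: gSpec r (d + 1) 0 := by simp [gSpec, h]
      rw [h2, ← ih (d + 1) 0, hnr]
      simp [renderFull, renderTail, fmtFrom,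
        PySem.List.pyRange_one_eq_nil (le_refl (c + 1))]
    · rw [fullseg_cons_nostart s r c h]
      obtain ⟨n, rest, hnr⟩ := List.exists_cons_of_ne_nil (fullseg_ne_nil r (c + 1))
      have hge : c + 1 ≤ n := by
        have := head_fullseg_ge r (c + 1); rw [hnr] at this; simpa using this
      have h2 : gSpec (s :: r) d c = pvFmt d (c + 1) :: gSpec r d (c + 1) := by simp [gSpec, h]
      rw [h2, ← ih d (c + 1), hnr]
      simp only [renderFull, fmtFrom]
      rw [PySem.List.pyRange_one_cons (by omega : c + 1 < n + 1)]
      simp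

theorem enumerate_flatMap_eq_renderTail (rest : List Int) (j : Int) :
    (PySem.List.enumerate rest j).flatMap
      (fun dn => "FORGET" :: (PySem.List.pyRange 1 (dn.2 + 1) 1).map (fun t => pvFmt dn.1 t))
      = renderTail rest j := by
  induction rest generalizing j with
  | nil => simp [PySem.List.enumerate_nil, renderTail]
  | cons n r ih => simp [PySem.List.enumerate_cons, renderTail, ih, fmtFrom]

theorem alt_eq_gSpec (corrected : List String) :
    rebuild_dialogs_alt corrected = gSpec (corrected.map pvFirstField) (-1) 0 := by
  unfold rebuild_dialogs_alt
  rw [seg_fold_eq_segRec]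
  obtain ⟨n, rest, hnr⟩ := List.exists_cons_of_ne_nil (fullseg_ne_nil (corrected.map pvFirstField) 0)
  rw [← renderFull_fullseg_eq_gSpec (corrected.map pvFirstField) (-1) 0]
  simp only [List.nil_append]
  rw [show (segRec (corrected.map pvFirstField) 0).1 ++ [(segRec (corrected.map pvFirstField) 0).2]
      = fullseg (corrected.map pvFirstField) 0 from rfl, hnr]
  simp only [List.headD_cons, List.drop_succ_cons, List.drop_zero, renderFull]
  rw [enumerate_flatMap_eq_renderTail]
  simp [fmtFrom]

-- ===== VERDICT (by name: the statement is the Claim_ definition above) =====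
theorem rebuild_dialogs_spec : Claim_equal_rebuild_dialogs := by
  intro corrected _
  unfold Spec_rebuild_dialogs rebuild_dialogs
  rw [rebuild_fold_eq_gSpec, alt_eq_gSpec]
  simp
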